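-- pv_equiv track=rewrite | github.com/its-bijaya/real-hr-backend | irhrs/recruitment/api/v1/serializers/job_apply.py | get_latest_education_info
-- ===== SOURCE A (Python) =====
-- def get_latest_education_info(educations):
--     if not educations:
--         return {}
--     degrees = ['PHD', 'Master', 'Bachelor', 'Diploma', 'Intermediate', 'SLC', 'Below SLC']
--     for degree in degrees:
--         latest_education = next(
--             (item for item in educations if item["degree"] == degree),
--             None
--         )
--         if latest_education:
--             return latest_education
-- ===== SOURCE B (Python) =====
-- def get_latest_education_info(educations):
--     if not educations:
--         return {}
--     ranks = {d: i for i, d in enumerate(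
--         ['PHD', 'Master', 'Bachelor', 'Diploma', 'Intermediate', 'SLC', 'Below SLC'])}
--     best = None
--     best_rank = len(ranks)
--     for item in educations:
--         rank = ranks.get(item.get("degree"))
--         if rank is not None and rank < best_rank:
--             best = item
--             best_rank = rank
--     return best
-- ===== Notes on version B (the rewrite author's own statement) =====
-- stated objective: alternative
-- what changed: Replaces A's loop over the 7 degree names (each a fresh scan of educations) by a single pass that keeps the best item and its priority rank looked up in a degree-to-rank dict (strict < keeps the first of equal-priority entries).
-- outside the precondition, e.g. on get_latest_education_info([{'degree': 'X'}]): A returns None, B returns None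
import Mathlib
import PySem

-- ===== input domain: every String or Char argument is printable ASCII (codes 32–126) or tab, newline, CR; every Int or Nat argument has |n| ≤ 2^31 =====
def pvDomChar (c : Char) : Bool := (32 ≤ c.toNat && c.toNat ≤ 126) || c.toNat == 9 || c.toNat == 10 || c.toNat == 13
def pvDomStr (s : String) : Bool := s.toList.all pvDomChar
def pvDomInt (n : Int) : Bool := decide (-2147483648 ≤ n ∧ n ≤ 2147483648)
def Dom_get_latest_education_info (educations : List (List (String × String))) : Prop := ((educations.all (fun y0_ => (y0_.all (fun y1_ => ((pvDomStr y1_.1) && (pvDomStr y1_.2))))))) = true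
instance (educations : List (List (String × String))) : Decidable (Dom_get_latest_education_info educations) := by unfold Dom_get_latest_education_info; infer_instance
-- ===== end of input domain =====

-- B replaces A's loop over the 7 degree names (each a fresh scan of educations) by a single pass that
-- keeps the best item and its rank from a degree→rank dict; equivalence is about the return value.

-- ===== PORT A =====
def aDegrees : List String :=
  ["PHD", "Master", "Bachelor", "Diploma", "Intermediate", "SLC", "Below SLC"]

-- next((item for item in educations if item["degree"] == degree), None); item["degree"] raising
-- KeyError (lookup = none) is excluded by Pre_.
def aNext (educations : List (List (String × String))) (degree : String) :
    Option (List (String × String)) :=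
  match educations with
  | [] => none
  | item :: rest =>
    if (PySem.Dict.mk item).get? "degree" = some degree then some item else aNext rest degree

def aLoop (ds : List String) (educations : List (List (String × String))) :
    List (String × String) :=
  match ds with
  | [] => []  -- A falls off the loop and returns None here; excluded by Pre_
  | d :: rest =>
    match aNext educations d with
    | some latest => if latest ≠ [] then latest else aLoop rest educations  -- `if latest_education:`
    | none => aLoop rest educations

def get_latest_education_info (educations : List (List (String × String))) :
    List (String × String) :=
  if educations = [] then [] else aLoop aDegrees educations

-- ===== PORT B =====
-- ranks = {d: i for i, d in enumerate([...])}
def bRanks : PySem.Dict String Int :=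
  (PySem.List.enumerate ["PHD", "Master", "Bachelor", "Diploma", "Intermediate", "SLC", "Below SLC"] 0).foldl
    (fun d p => d.insert p.2 p.1) PySem.Dict.empty

-- one loop iteration: rank = ranks.get(item.get("degree")); adopt item iff rank < best_rank
def bStep (st : Option (List (String × String)) × Int) (item : List (String × String)) :
    Option (List (String × String)) × Int :=
  match (PySem.Dict.mk item).get? "degree" with
  | none => st  -- item.get("degree") is None, and ranks.get(None) is None
  | some dg =>
    match bRanks.get? dg with
    | none => st
    | some r => if r < st.2 then (some item, r) else st

def get_latest_education_info_alt (educations : List (List (String × String))) :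
    List (String × String) :=
  if educations = [] then []
  else
    match (educations.foldl bStep (none, 7)).1 with
    | some best => best
    | none => []  -- Python B returns None here; excluded by Pre_

-- ===== PRECONDITION & SPEC =====
-- Pre_ excludes (a) lists where an entry without a "degree" key precedes the first 'PHD' entry — A's
-- first generator pass scans exactly those and raises KeyError on them — and (b) non-empty lists with
-- no recognised degree, on which A falls off its loop and returns None, not a value of the declared type.
def Pre_get_latest_education_info (educations : List (List (String × String))) : Prop :=
  (∀ item ∈ educations.takeWhile
      (fun x => !((PySem.Dict.mk x).get? "degree" == some "PHD")),
      ((PySem.Dict.mk item).get? "degree").isSome = true) ∧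
  (educations = [] ∨ ∃ item ∈ educations, ∃ d ∈
      (["PHD", "Master", "Bachelor", "Diploma", "Intermediate", "SLC", "Below SLC"] : List String),
      (PySem.Dict.mk item).get? "degree" = some d)

instance (educations : List (List (String × String))) :
    Decidable (Pre_get_latest_education_info educations) := by
  unfold Pre_get_latest_education_info; infer_instance

def pvWitness_get_latest_education_info : (List (List (String × String))) :=
  [[("degree", "Bachelor"), ("name", "x")], [("degree", "Master")]]

def Spec_get_latest_education_info (educations : List (List (String × String)))
    (out : List (String × String)) : Prop :=
  out = get_latest_education_info_alt educations

instance (educations : List (List (String × String))) (out : List (String × String)) :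
    Decidable (Spec_get_latest_education_info educations out) := by
  unfold Spec_get_latest_education_info; infer_instance

-- ===== CLAIM (what is proved, stated in full; the proofs are below) =====
def Claim_equal_get_latest_education_info : Prop :=
  ∀ (educations : List (List (String × String))), Dom_get_latest_education_info educations →
    Pre_get_latest_education_info educations →
    Spec_get_latest_education_info educations (get_latest_education_info educations)

-- ===== LEMMAS AND PROOFS =====

-- the item's degree value (first "degree" binding), and its priority rank (7 = unknown degree)
def dg (item : List (String × String)) : Option String := (PySem.Dict.mk item).get? "degree"

def rnk (d : String) : Int :=
  if d = "PHD" then 0 else if d = "Master" then 1 else if d = "Bachelor" then 2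
  else if d = "Diploma" then 3 else if d = "Intermediate" then 4 else if d = "SLC" then 5
  else if d = "Below SLC" then 6 else 7

def irk (item : List (String × String)) : Int :=
  match dg item with
  | some d => rnk d
  | none => 7

-- the running minimum rank B's loop maintains
def minR (xs : List (List (String × String))) (br : Int) : Int :=
  xs.foldl (fun a x => if irk x < a then irk x else a) br

theorem rnk_nonneg (d : String) : 0 ≤ rnk d := by unfold rnk; split_ifs <;> norm_num

theorem rnk_le (d : String) : rnk d ≤ 7 := by unfold rnk; split_ifs <;> norm_num

theorem irk_nonneg (x : List (String × String)) : 0 ≤ irk x := by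
  unfold irk; cases dg x <;> simp [rnk_nonneg]

theorem irk_le (x : List (String × String)) : irk x ≤ 7 := by
  unfold irk; cases dg x <;> simp [rnk_le]

set_option maxHeartbeats 1000000 in
theorem bRanks_get (d : String) : bRanks.get? d = if rnk d < 7 then some (rnk d) else none := by
  have h : bRanks = PySem.Dict.mk [("PHD",0),("Master",1),("Bachelor",2),("Diploma",3),("Intermediate",4),("SLC",5),("Below SLC",6)] := by rfl
  rw [h]
  rcases eq_or_ne d "PHD" with rfl|h1; · decide
  rcases eq_or_ne d "Master" with rfl|h2; · decide
  rcases eq_or_ne d "Bachelor" with rfl|h3; · decide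
  rcases eq_or_ne d "Diploma" with rfl|h4; · decide
  rcases eq_or_ne d "Intermediate" with rfl|h5; · decide
  rcases eq_or_ne d "SLC" with rfl|h6; · decide
  rcases eq_or_ne d "Below SLC" with rfl|h7; · decide
  simp [rnk, beq_iff_eq, h1, h2, h3, h4, h5, h6, h7,
    Ne.symm h1, Ne.symm h2, Ne.symm h3, Ne.symm h4, Ne.symm h5, Ne.symm h6, Ne.symm h7,
    PySem.Dict.get?]

theorem bStep_eq (st : Option (List (String × String)) × Int) (x : List (String × String))
    (h : st.2 ≤ 7) : bStep st x = if irk x < st.2 then (some x, irk x) else st := by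
  unfold bStep irk dg
  cases hg : (PySem.Dict.mk x).get? "degree" with
  | none =>
    have : ¬ (7 : Int) < st.2 := by omega
    simp [this]
  | some d =>
    simp only []
    rw [bRanks_get]
    by_cases hr : rnk d < 7
    · simp [hr]
    · have h7 : rnk d = 7 := by have := rnk_le d; omega
      have : ¬ (rnk d) < st.2 := by omega
      simp [hr, this]

theorem minR_le_init (xs : List (List (String × String))) (br : Int) : minR xs br ≤ br := by
  induction xs generalizing br with
  | nil => simp [minR]
  | cons x xs ih =>
    simp only [minR, List.foldl_cons]
    refine le_trans (ih _) ?_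
    split <;> omega

theorem minR_le_mem {xs : List (List (String × String))} {x : List (String × String)}
    (hx : x ∈ xs) (br : Int) : minR xs br ≤ irk x := by
  induction xs generalizing br with
  | nil => cases hx
  | cons y ys ih =>
    simp only [minR, List.foldl_cons]
    rcases List.mem_cons.mp hx with rfl|h
    · refine le_trans (minR_le_init ys _) ?_; split <;> omega
    · exact ih h _

theorem minR_ge {xs : List (List (String × String))} {c : Int}
    (h : ∀ x ∈ xs, c ≤ irk x) : ∀ {br : Int}, c ≤ br → c ≤ minR xs br := by
  induction xs with
  | nil => intro br hbr; simpa [minR] using hbr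
  | cons y ys ih =>
    intro br hbr
    simp only [minR, List.foldl_cons]
    have hy := h y (by simp)
    exact ih (fun x hx => h x (by simp [hx])) (by split <;> omega)

-- B's loop computes the running minimum rank and the FIRST item attaining it
theorem foldB (xs : List (List (String × String))) : ∀ (st : Option (List (String × String)) × Int),
    st.2 ≤ 7 →
    xs.foldl bStep st =
      ((if minR xs st.2 < st.2 then xs.find? (fun x => irk x == minR xs st.2) else st.1),
        minR xs st.2) := by
  induction xs with
  | nil => intro st h; simp [minR]
  | cons x xs ih =>
    intro st h
    have hcons : ∀ b : Int, minR (x :: xs) b = minR xs (if irk x < b then irk x else b) := by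
      intro b; simp [minR]
    rw [List.foldl_cons, bStep_eq st x h, hcons, List.find?]
    by_cases h1 : irk x < st.2
    · simp only [if_pos h1]
      rw [ih (some x, irk x) (irk_le x)]
      simp only []
      have hm : minR xs (irk x) ≤ irk x := minR_le_init xs (irk x)
      have hlt : minR xs (irk x) < st.2 := by omega
      rw [if_pos hlt]
      by_cases h2 : minR xs (irk x) < irk x
      · have hne : (irk x == minR xs (irk x)) = false := by
          simp only [beq_eq_false_iff_ne]; omega
        simp [hne, h2]
      · have heq : minR xs (irk x) = irk x := by omega
        simp [heq]
    · simp only [if_neg h1]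
      rw [ih st h]
      by_cases h3 : minR xs st.2 < st.2
      · have hne : (irk x == minR xs st.2) = false := by
          simp only [beq_eq_false_iff_ne]
          have := minR_le_init xs st.2; omega
        simp [hne, h3]
      · simp [h3]

theorem find?_irk_isSome (xs : List (List (String × String))) : ∀ (br : Int),
    minR xs br < br → (xs.find? (fun x => irk x == minR xs br)).isSome = true := by
  induction xs with
  | nil => intro br h; simp [minR] at h
  | cons x xs ih =>
    intro br h
    have hcons : minR (x :: xs) br = minR xs (if irk x < br then irk x else br) := by
      simp [minR]
    rw [hcons] at h ⊢
    rw [List.find?]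
    by_cases h1 : irk x < br
    · simp only [if_pos h1] at h ⊢
      have hm : minR xs (irk x) ≤ irk x := minR_le_init xs (irk x)
      by_cases h2 : minR xs (irk x) < irk x
      · have hne : (irk x == minR xs (irk x)) = false := by
          simp only [beq_eq_false_iff_ne]; omega
        rw [hne]; exact ih (irk x) h2
      · have heq : (irk x == minR xs (irk x)) = true := by
          simp only [beq_iff_eq]; omega
        rw [heq]; rfl
    · simp only [if_neg h1] at h ⊢
      have hm : minR xs br ≤ br := minR_le_init xs br
      have hne : (irk x == minR xs br) = false := by
        simp only [beq_eq_false_iff_ne]; omega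
      rw [hne]; exact ih br h

theorem aNext_eq_find? (xs : List (List (String × String))) (d : String) :
    aNext xs d = xs.find? (fun x => dg x == some d) := by
  induction xs with
  | nil => rfl
  | cons x xs ih =>
    rw [aNext, List.find?]
    by_cases h : (PySem.Dict.mk x).get? "degree" = some d
    · have : (dg x == some d) = true := by simp [dg, h]
      rw [this, if_pos h]
    · have : (dg x == some d) = false := by simp [dg, h]
      rw [this, if_neg h, ih]

theorem rnk_eq_iff (k : Nat) (hk : k < 7) (d : String) :
    rnk d = (k : Int) ↔ d = aDegrees[k]! := by
  interval_cases k <;> simp [aDegrees] <;> unfold rnk <;> split_ifs <;> simp_all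

theorem irk_eq_iff (k : Nat) (hk : k < 7) (x : List (String × String)) :
    (dg x == some aDegrees[k]!) = (irk x == (k : Int)) := by
  unfold irk
  cases hg : dg x with
  | none =>
    have : ((7 : Int) == (k : Int)) = false := by
      simp only [beq_eq_false_iff_ne]; omega
    simp [this]
  | some d =>
    rw [Bool.eq_iff_iff]
    simp only [beq_iff_eq, Option.some.injEq]
    exact (rnk_eq_iff k hk d).symm

theorem irk_lt_ne_nil {x : List (String × String)} (h : irk x < 7) : x ≠ [] := by
  intro rfl_h; subst rfl_h
  simp [irk, dg, PySem.Dict.get?] at h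

-- A's loop from the k-th degree on returns the first item attaining the minimal rank ≥ k
theorem aLoop_char : ∀ (n k : Nat), k + n = 7 → ∀ (xs : List (List (String × String))),
    aLoop (aDegrees.drop k) xs =
      (if minR (xs.filter (fun x => decide ((k : Int) ≤ irk x))) 7 < 7 then
        (xs.find? (fun x => irk x == minR (xs.filter (fun x => decide ((k : Int) ≤ irk x))) 7)).getD []
      else []) := by
  intro n
  induction n with
  | zero =>
    intro k hk xs
    have hk7 : k = 7 := by omega
    subst hk7
    have hd : aDegrees.drop 7 = [] := rfl
    rw [hd, aLoop]
    have hge : (7 : Int) ≤ minR (xs.filter (fun x => decide ((7 : Nat) ≤ irk x))) 7 := by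
      refine minR_ge ?_ le_rfl
      intro x hx
      have := (List.mem_filter.mp hx).2
      simpa using this
    rw [if_neg (by omega)]
  | succ n ih =>
    intro k hk xs
    have hklt : k < 7 := by omega
    have hlen : k < aDegrees.length := by simp [aDegrees]; omega
    have hdrop : aDegrees.drop k = aDegrees[k]! :: aDegrees.drop (k + 1) := by
      rw [getElem!_pos aDegrees k hlen]
      exact List.drop_eq_getElem_cons hlen
    rw [hdrop, aLoop, aNext_eq_find?]
    have hpred : (fun x => dg x == some aDegrees[k]!) = (fun x => irk x == (k : Int)) := by
      funext x; exact irk_eq_iff k hklt x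
    rw [hpred]
    cases hf : xs.find? (fun x => irk x == (k : Int)) with
    | some y =>
      have hy : irk y = (k : Int) := by
        have := List.find?_some hf; simpa using this
      have hymem : y ∈ xs := List.mem_of_find?_eq_some hf
      have hne : y ≠ [] := irk_lt_ne_nil (by omega)
      simp only []
      rw [if_pos hne]
      have hyf : y ∈ xs.filter (fun x => decide ((k : Int) ≤ irk x)) := by
        refine List.mem_filter.mpr ⟨hymem, by simp [hy]⟩
      have hle : minR (xs.filter (fun x => decide ((k : Int) ≤ irk x))) 7 ≤ (k : Int) := by
        have := minR_le_mem hyf 7; omega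
      have hge : (k : Int) ≤ minR (xs.filter (fun x => decide ((k : Int) ≤ irk x))) 7 := by
        refine minR_ge ?_ (by omega)
        intro x hx
        have := (List.mem_filter.mp hx).2
        simpa using this
      have hm : minR (xs.filter (fun x => decide ((k : Int) ≤ irk x))) 7 = (k : Int) := by omega
      rw [hm, if_pos (by omega), hf]
      rfl
    | none =>
      simp only []
      rw [ih (k + 1) (by omega) xs]
      have hnone := List.find?_eq_none.mp hf
      have hfilter : xs.filter (fun x => decide ((k : Int) ≤ irk x)) =
          xs.filter (fun x => decide (((k + 1 : Nat) : Int) ≤ irk x)) := by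
        refine List.filter_congr ?_
        intro x hx
        have hne : irk x ≠ (k : Int) := by
          have := hnone x hx; simpa using this
        have : ((k : Int) ≤ irk x) ↔ (((k + 1 : Nat) : Int) ≤ irk x) := by push_cast; omega
        simp [this]
      rw [hfilter]

-- ===== VERDICT (by name: the statement is the Claim_ definition above) =====
theorem get_latest_education_info_spec : Claim_equal_get_latest_education_info := by
  intro educations _hdom hpre
  unfold Spec_get_latest_education_info get_latest_education_info get_latest_education_info_alt
  rcases hpre with ⟨_hkeys, hne⟩
  by_cases hnil : educations = []
  · simp [hnil]
  rw [if_neg hnil, if_neg hnil]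
  rcases hne with h | ⟨item, hitem, d, hd, hget⟩
  · exact absurd h hnil
  have hrnk : rnk d < 7 := by
    simp only [List.mem_cons] at hd
    rcases hd with rfl|rfl|rfl|rfl|rfl|rfl|rfl|h
    · decide
    · decide
    · decide
    · decide
    · decide
    · decide
    · decide
    · cases h
  have hirk : irk item < 7 := by
    unfold irk dg
    rw [hget]
    exact hrnk
  have hm : minR educations 7 < 7 := by
    have := minR_le_mem hitem 7
    omega
  -- A side
  have hfilter0 : educations.filter (fun x => decide (((0 : Nat) : Int) ≤ irk x)) = educations := by
    refine List.filter_eq_self.mpr ?_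
    intro x _
    simpa using irk_nonneg x
  have hA := aLoop_char 7 0 rfl educations
  rw [hfilter0] at hA
  have h0 : aDegrees.drop 0 = aDegrees := rfl
  rw [h0] at hA
  rw [hA, if_pos hm]
  -- B side
  rw [foldB educations (none, 7) (by norm_num)]
  simp only [if_pos hm]
  have hs := find?_irk_isSome educations 7 hm
  obtain ⟨y, hy⟩ := Option.isSome_iff_exists.mp hs
  rw [hy]
  rfl
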